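-- pv_equiv track=rewrite | github.com/vldbss-2022/vldbss2022 | lab3/data/generator/gen.py | remove_hint
-- ===== SOURCE A (Python) =====
-- def remove_hint(q):
--     for (b, e) in [("/*", "*/"), ("USE INDEX", ")")]:
--         pb = q.find(b)
--         if pb == -1:
--             continue
--         pe = q.find(e, pb+len(b))
--         if pe == -1:
--             continue
--         q = q[:pb] + q[pe+len(e):]
--     return q
-- ===== SOURCE B (Python) =====
-- import re
--
-- def remove_hint(q):
--     q = re.sub(r"/\*.*?\*/", "", q, count=1, flags=re.DOTALL)
--     return re.sub(r"USE INDEX.*?\)", "", q, count=1, flags=re.DOTALL)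
-- ===== Notes on version B (the rewrite author's own statement) =====
-- stated objective: idiomatic
-- what changed: Replaces the find/index/slice loop over delimiter pairs by two sequential re.sub regex substitutions (count=1, DOTALL, non-greedy), letting the regex engine locate and delete each hint span; no index arithmetic remains.
import Mathlib
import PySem

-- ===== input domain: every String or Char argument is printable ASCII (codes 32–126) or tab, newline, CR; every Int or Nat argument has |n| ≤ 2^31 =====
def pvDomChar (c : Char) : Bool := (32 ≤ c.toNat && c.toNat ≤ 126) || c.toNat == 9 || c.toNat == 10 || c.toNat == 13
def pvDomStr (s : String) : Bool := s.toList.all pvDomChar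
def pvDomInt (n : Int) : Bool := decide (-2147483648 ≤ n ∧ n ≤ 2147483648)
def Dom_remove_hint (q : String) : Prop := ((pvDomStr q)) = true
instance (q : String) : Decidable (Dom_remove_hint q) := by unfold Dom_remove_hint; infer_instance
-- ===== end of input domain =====

-- B replaces A's find/slice index loop by two sequential regex substitutions (re.sub, count=1, DOTALL); idiomatic, same cost.

-- ===== PORT A =====
-- one iteration of A's for-loop body: pb = q.find(b); pe = q.find(e, pb+len(b)); q = q[:pb] + q[pe+len(e):]
def removeHintStep (q : List Char) (p : List Char × List Char) : List Char :=
  let b := p.1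
  let e := p.2
  let pb := PySem.Chars.find q b
  if pb = -1 then q
  else
    let pe := PySem.Chars.findFrom q e (pb + (PySem.Chars.len b : Int)) none
    if pe = -1 then q
    else PySem.Chars.slice q none (some pb) ++ PySem.Chars.slice q (some (pe + (PySem.Chars.len e : Int))) none

def remove_hint (q : String) : String :=
  String.ofList ([("/*".toList, "*/".toList), ("USE INDEX".toList, ")".toList)].foldl removeHintStep q.toList)

-- ===== PORT B =====
-- Hand port of re.sub(lit_b + ".*?" + lit_e, "", q, count=1, flags=re.DOTALL): the regex engine's
-- leftmost-match scan — try each position left to right; at a position the pattern matches iff lit_b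
-- is a prefix there and lit_e occurs somewhere after it (non-greedy .*? consumes up to the FIRST such
-- occurrence, located with PySem.Chars.find); the matched span is deleted, the scan stops (count=1).
-- Exact for this literal-.*?-literal pattern shape under DOTALL.
def reSubOnce (b e : List Char) : List Char → List Char
  | [] => []
  | c :: rest =>
    if b.isPrefixOf (c :: rest) then
      let j := PySem.Chars.find ((c :: rest).drop b.length) e
      if 0 ≤ j then (c :: rest).drop (b.length + j.toNat + e.length)
      else c :: reSubOnce b e rest
    else c :: reSubOnce b e rest

def remove_hint_alt (q : String) : String :=
  String.ofList (reSubOnce "USE INDEX".toList ")".toList (reSubOnce "/*".toList "*/".toList q.toList))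

-- ===== PRECONDITION & SPEC =====
def Spec_remove_hint (q : String) (out : String) : Prop := out = remove_hint_alt q
instance (q : String) (out : String) : Decidable (Spec_remove_hint q out) := by unfold Spec_remove_hint; infer_instance

-- ===== CLAIM =====
def Claim_equal_remove_hint : Prop := ∀ (q : String), Dom_remove_hint q → Spec_remove_hint q (remove_hint q)

-- ===== LEMMAS AND PROOFS =====

-- common normal form of one hint removal: first b occurrence, then first e occurrence after it
def matchSpec (b e q : List Char) : List Char :=
  if 0 ≤ PySem.Chars.find q b then
    let i := (PySem.Chars.find q b).toNat
    let j := PySem.Chars.find (q.drop (i + b.length)) e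
    if 0 ≤ j then q.take i ++ q.drop (i + b.length + j.toNat + e.length)
    else q
  else q

theorem find_eq_first (s sub : List Char) (k : Nat) (h1 : sub <+: s.drop k)
    (h2 : ∀ i < k, ¬ sub <+: s.drop i) : PySem.Chars.find s sub = (k : Int) := by
  have hin : sub <:+: s := h1.isInfix.trans (s.drop_suffix k).isInfix
  have hnn : 0 ≤ PySem.Chars.find s sub := (PySem.Chars.find_nonneg_iff s sub).2 hin
  obtain ⟨hp, hfirst⟩ := PySem.Chars.find_spec (s := s) (sub := sub) hnn
  rcases lt_trichotomy (PySem.Chars.find s sub).toNat k with h | h | h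
  · exact absurd hp (h2 _ h)
  · omega
  · exact absurd h1 (hfirst k h)

theorem reSubOnce_no_match (b e q : List Char)
    (h : ∀ i, b <+: q.drop i → ¬ e <:+: q.drop (i + b.length)) : reSubOnce b e q = q := by
  induction q with
  | nil => rfl
  | cons c rest ih =>
    have hrec : reSubOnce b e rest = rest :=
      ih (fun i hpi hei => h (i + 1) (by simpa [List.drop_succ_cons] using hpi)
        (by simpa [List.drop_succ_cons, Nat.add_right_comm] using hei))
    by_cases hp : b.isPrefixOf (c :: rest)
    · have hne : ¬ 0 ≤ PySem.Chars.find ((c :: rest).drop b.length) e := by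
        intro hge
        exact h 0 (List.isPrefixOf_iff_prefix.1 hp)
          (by simpa using (PySem.Chars.find_nonneg_iff _ e).1 hge)
      simp [reSubOnce, hp, hne, hrec]
    · simp [reSubOnce, hp, hrec]

theorem reSubOnce_eq_matchSpec (b e q : List Char) (hb : b ≠ []) :
    reSubOnce b e q = matchSpec b e q := by
  induction q with
  | nil =>
    have hf : ¬ 0 ≤ PySem.Chars.find ([] : List Char) b := by
      intro hge
      exact hb (List.eq_nil_of_infix_nil ((PySem.Chars.find_nonneg_iff _ b).1 hge))
    simp [reSubOnce, matchSpec, hf]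
  | cons c rest ih =>
    by_cases hp : b.isPrefixOf (c :: rest)
    · have hpre : b <+: (c :: rest) := List.isPrefixOf_iff_prefix.1 hp
      have hf0 : PySem.Chars.find (c :: rest) b = (0 : Int) :=
        find_eq_first _ _ 0 (by simpa using hpre) (by omega)
      by_cases hj : 0 ≤ PySem.Chars.find ((c :: rest).drop b.length) e
      · simp [reSubOnce, hp, hj, matchSpec, hf0]
      · -- b matches at 0 but no e after it: no later position can match either
        have hno : ∀ i, b <+: (c :: rest).drop i → ¬ e <:+: (c :: rest).drop (i + b.length) := by
          intro i _ hei
          apply hj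
          apply (PySem.Chars.find_nonneg_iff _ e).2
          refine hei.trans ?_
          have hsfx := ((c :: rest).drop b.length).drop_suffix i
          rw [List.drop_drop] at hsfx
          exact (by simpa [Nat.add_comm] using hsfx.isInfix)
        rw [reSubOnce_no_match b e (c :: rest) hno]
        simp [matchSpec, hf0, hj]
    · have hnpre : ¬ b <+: (c :: rest) := fun h => hp (List.isPrefixOf_iff_prefix.2 h)
      have hstep : reSubOnce b e (c :: rest) = c :: reSubOnce b e rest := by
        simp [reSubOnce, hp]
      rw [hstep, ih]
      by_cases hr : 0 ≤ PySem.Chars.find rest b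
      · -- first occurrence in rest at k ⇒ first occurrence in c::rest at k+1
        obtain ⟨hpk, hfirstk⟩ := PySem.Chars.find_spec (s := rest) (sub := b) hr
        set k := (PySem.Chars.find rest b).toNat with hk
        have hfined : PySem.Chars.find (c :: rest) b = ((k + 1 : Nat) : Int) := by
          apply find_eq_first
          · simpa [List.drop_succ_cons] using hpk
          · intro i hi
            match i with
            | 0 => simpa using hnpre
            | (i' + 1) =>
              simpa [List.drop_succ_cons] using hfirstk i' (by omega)
        have hfr : PySem.Chars.find rest b = (k : Int) := by omega
        simp only [matchSpec, hfined, hfr, if_pos (by positivity : (0:Int) ≤ ((k+1:Nat):Int))]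
        simp only [Int.toNat_natCast]
        have hd : (c :: rest).drop (k + 1 + b.length) = rest.drop (k + b.length) := by
          have h' : k + 1 + b.length = (k + b.length) + 1 := by omega
          rw [h', List.drop_succ_cons]
        rw [hd]
        by_cases hj2 : 0 ≤ PySem.Chars.find (rest.drop (k + b.length)) e
        · simp only [hj2, if_true]
          have ht : (c :: rest).take (k + 1) = c :: rest.take k := by simp
          have hdd : (c :: rest).drop (k + 1 + b.length + (PySem.Chars.find (rest.drop (k + b.length)) e).toNat + e.length)
              = rest.drop (k + b.length + (PySem.Chars.find (rest.drop (k + b.length)) e).toNat + e.length) := by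
            have h' : k + 1 + b.length + (PySem.Chars.find (rest.drop (k + b.length)) e).toNat + e.length
                = (k + b.length + (PySem.Chars.find (rest.drop (k + b.length)) e).toNat + e.length) + 1 := by omega
            rw [h', List.drop_succ_cons]
          rw [ht, hdd]
          rfl
        · simp [hj2]
      · -- b nowhere in rest, and not a prefix at 0: not in c::rest at all
        have hnin : ¬ b <:+: rest := fun h => hr ((PySem.Chars.find_nonneg_iff _ b).2 h)
        have hnin2 : ¬ 0 ≤ PySem.Chars.find (c :: rest) b := by
          intro hge
          rcases List.infix_cons_iff.1 ((PySem.Chars.find_nonneg_iff _ b).1 hge) with h | h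
          · exact hnpre h
          · exact hnin h
        simp [matchSpec, hr, hnin2]

theorem step_eq_matchSpec (q b e : List Char) :
    removeHintStep q (b, e) = matchSpec b e q := by
  by_cases h1 : PySem.Chars.find q b = -1
  · simp [removeHintStep, matchSpec, h1]

  · have hpb0 : 0 ≤ PySem.Chars.find q b := by
      have := PySem.Chars.neg_one_le_find q b; omega
    have hpre : b <+: q.drop (PySem.Chars.find q b).toNat :=
      (PySem.Chars.find_spec hpb0).1
    have hpble : PySem.Chars.find q b ≤ (q.length : Int) := PySem.Chars.find_le_length q b
    have hk : (PySem.Chars.find q b).toNat + b.length ≤ q.length := by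
      have h2 := hpre.length_le
      simp only [List.length_drop] at h2
      omega
    have hcast : PySem.Chars.find q b + (PySem.Chars.len b : Int)
        = (((PySem.Chars.find q b).toNat + b.length : Nat) : Int) := by
      simp only [PySem.Chars.len_eq]; push_cast; omega
    by_cases h2 : PySem.Chars.find (q.drop ((PySem.Chars.find q b).toNat + b.length)) e = -1
    · have hn2 : ¬ 0 ≤ PySem.Chars.find (q.drop ((PySem.Chars.find q b).toNat + b.length)) e := by
        omega
      simp only [removeHintStep, h1, if_false, hcast,
        PySem.Chars.findFrom_natCast q e _ hk, h2, if_true]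
      simp [matchSpec, hpb0, hn2]
    · have hj0 : 0 ≤ PySem.Chars.find (q.drop ((PySem.Chars.find q b).toNat + b.length)) e := by
        have := PySem.Chars.neg_one_le_find (q.drop ((PySem.Chars.find q b).toNat + b.length)) e
        omega
      have hne : ¬ ((((PySem.Chars.find q b).toNat + b.length : Nat) : Int)
          + PySem.Chars.find (q.drop ((PySem.Chars.find q b).toNat + b.length)) e = -1) := by
        push_cast; omega
      simp only [removeHintStep, if_neg h1, hcast,
        PySem.Chars.findFrom_natCast q e _ hk, if_neg h2, if_neg hne,
        PySem.Chars.slice_eq_listSlice, matchSpec, if_pos hpb0, if_pos hj0]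
      congr 1
      · rw [PySem.List.slice_to q hpb0]
      · rw [PySem.List.slice_from q (by simp only [PySem.Chars.len_eq]; push_cast; omega)]
        congr 1
        simp only [PySem.Chars.len_eq]
        push_cast
        omega

-- ===== VERDICT =====
theorem remove_hint_spec : Claim_equal_remove_hint := by
  intro q _
  unfold Spec_remove_hint remove_hint remove_hint_alt
  show String.ofList _ = String.ofList _
  rw [List.foldl, List.foldl, List.foldl,
    step_eq_matchSpec q.toList "/*".toList "*/".toList,
    ← reSubOnce_eq_matchSpec "/*".toList "*/".toList q.toList (by decide),
    step_eq_matchSpec _ "USE INDEX".toList ")".toList,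
    ← reSubOnce_eq_matchSpec "USE INDEX".toList ")".toList _ (by decide)]
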